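-- pv_equiv track=rewrite | github.com/tyut-vision-creative-ai-lab/te | model/HLFRN.py | get_freq_position
-- ===== SOURCE A (Python) =====
-- def get_freq_position(view_n):
-- 	start_position_list = []
-- 	for i in range(view_n):
-- 		start_position_list.append(([i], [0]))
-- 	for j in range(1, view_n):
-- 		start_position_list.append(([view_n - 1], [j]))
-- 	for item in start_position_list:
-- 		while item[0][0] > 0 and item[1][0] < view_n - 1:
-- 			item[0].insert(0, item[0][0] - 1)
-- 			item[1].insert(0, item[1][0] + 1)
-- 	return start_position_list
-- ===== SOURCE B (Python) =====
-- def get_freq_position(view_n):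
-- 	nd = 2 * view_n - 1
-- 	rows = [[] for _ in range(nd)]
-- 	cols = [[] for _ in range(nd)]
-- 	for r in range(view_n):
-- 		for c in range(view_n):
-- 			rows[r + c].append(r)
-- 			cols[r + c].append(c)
-- 	return [(rows[d], cols[d]) for d in range(nd)]
-- ===== Notes on version B (the rewrite author's own statement) =====
-- stated objective: alternative
-- what changed: Replaces A's anchor-then-extend (build one anchor per diagonal, then grow it with a while-loop prepending cells) by a single scan over all grid cells that buckets row and column coordinates into per-diagonal lists keyed by the anti-diagonal index r+c.
import Mathlib
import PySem

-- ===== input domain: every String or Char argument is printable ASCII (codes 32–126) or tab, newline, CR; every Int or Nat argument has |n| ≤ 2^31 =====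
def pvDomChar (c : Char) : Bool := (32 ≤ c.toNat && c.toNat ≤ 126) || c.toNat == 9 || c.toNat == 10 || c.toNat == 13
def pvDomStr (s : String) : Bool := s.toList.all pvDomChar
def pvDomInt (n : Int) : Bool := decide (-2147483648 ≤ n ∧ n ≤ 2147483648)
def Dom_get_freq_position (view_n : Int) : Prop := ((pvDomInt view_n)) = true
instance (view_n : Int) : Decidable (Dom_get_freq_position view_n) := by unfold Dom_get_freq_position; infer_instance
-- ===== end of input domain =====

-- B replaces A's anchor-then-extend while-loops by a single scan over all grid cells that
-- buckets row/column coordinates into 2*view_n-1 per-diagonal lists keyed by r+c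
-- (objective: alternative algorithm, same asymptotic cost).
-- A mutates the tuples' inner lists in place while building its result; the equivalence
-- proved here is about the RETURN value.

-- ===== PORT A =====
-- the while-loop 'item[0].insert(0, item[0][0]-1); item[1].insert(0, item[1][0]+1)'.
-- Python reads item[0][0] / item[1][0]; every item is built with nonempty singleton lists,
-- so the head pattern-match is exact on A's data (the catch-all is unreachable).
def extendA (view_n : Int) : List Int × List Int → List Int × List Int
  | (r :: rs, c :: cs) =>
      if r > 0 ∧ c < view_n - 1 then
        extendA view_n ((r - 1) :: r :: rs, (c + 1) :: c :: cs)
      else (r :: rs, c :: cs)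
  | p => p
termination_by p => (match p.1 with | r :: _ => r.toNat | [] => 0)
decreasing_by simp; omega
def get_freq_position (view_n : Int) : List (List Int × List Int) :=
  ((PySem.List.pyRange 1 view_n 1).foldl
      (fun acc j => acc ++ [([view_n - 1], [j])])
      ((PySem.List.pyRange 0 view_n 1).foldl (fun acc i => acc ++ [([i], [(0 : Int)])]) [])).map
    (fun item => extendA view_n item)

-- ===== PORT B =====
-- per Source B: rows/cols tables of 2*view_n-1 empty buckets; one scan of all cells (r,c)
-- appending r to rows[r+c] and c to cols[r+c]; those indices are nonnegative and in
-- range, so '.toNat' on them is exact.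
def get_freq_position_alt (view_n : Int) : List (List Int × List Int) :=
  let nd := 2 * view_n - 1
  let rows : List (List Int) := (PySem.List.pyRange 0 nd 1).map (fun _ => [])
  let cols : List (List Int) := (PySem.List.pyRange 0 nd 1).map (fun _ => [])
  let st := (PySem.List.pyRange 0 view_n 1).foldl
    (fun st r =>
      (PySem.List.pyRange 0 view_n 1).foldl
        (fun (st : List (List Int) × List (List Int)) c =>
          (st.1.modify (r + c).toNat (· ++ [r]), st.2.modify (r + c).toNat (· ++ [c])))
        st)
    (rows, cols)
  (PySem.List.pyRange 0 nd 1).map (fun d => (st.1.getD d.toNat [], st.2.getD d.toNat []))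

-- ===== PRECONDITION & SPEC =====
def Spec_get_freq_position (view_n : Int) (out : List (List Int × List Int)) : Prop := out = get_freq_position_alt view_n
instance (view_n : Int) (out : List (List Int × List Int)) : Decidable (Spec_get_freq_position view_n out) := by unfold Spec_get_freq_position; infer_instance

-- ===== CLAIM (what is proved, stated in full; the proofs are below) =====
def Claim_equal_get_freq_position : Prop := ∀ (view_n : Int), Dom_get_freq_position view_n → Spec_get_freq_position view_n (get_freq_position view_n)

-- ===== LEMMAS AND PROOFS =====
-- common characterisation: anti-diagonal d of an m×m grid has rows max(0,d+1-m)..min(d,m-1)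
-- in increasing order, and column d-r for row r.

def ramp (lo : Int) : Nat → List Int
  | 0 => []
  | k + 1 => lo :: ramp (lo + 1) k

def specRows (m d : Nat) : List Int := ramp ((d + 1 - m : Nat) : Int) (min (d + 1) m - (d + 1 - m))

def specDiag (m d : Nat) : List Int × List Int :=
  (specRows m d, (specRows m d).map (fun r => (d : Int) - r))

def specList (m : Nat) : List (List Int × List Int) := (List.range (2 * m - 1)).map (specDiag m)

theorem ramp_snoc (lo : Int) (k : Nat) : ramp lo (k + 1) = ramp lo k ++ [lo + k] := by
  induction k generalizing lo with
  | zero => simp [ramp]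
  | succ k ih =>
    rw [ramp, ih, ramp]
    simp
    ring_nf

theorem extend_spec (n d s : Int) (k : Nat)
    (hs0 : 0 ≤ s) (hs1 : d - n + 1 ≤ s) (hstop : ¬(s > 0 ∧ d - s < n - 1)) :
    ∀ (rs cs : List Int),
    extendA n ((s + (k : Int)) :: rs, (d - (s + (k : Int))) :: cs) =
      (ramp s (k + 1) ++ rs, (ramp s (k + 1)).map (fun x => d - x) ++ cs) := by
  induction k with
  | zero =>
    intro rs cs
    rw [extendA]
    simp only [Nat.cast_zero, add_zero]
    rw [if_neg (by omega)]
    simp [ramp]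
  | succ k ih =>
    intro rs cs
    rw [extendA]
    rw [if_pos (by push_cast; omega)]
    have h1 : s + ((k:Nat)+1 : Nat) - 1 = s + (k : Int) := by push_cast; ring
    have h2 : d - (s + ((k:Nat)+1 : Nat)) + 1 = d - (s + (k : Int)) := by push_cast; ring
    rw [h1, h2]
    rw [ih ((s + ((k:Nat)+1 : Nat)) :: rs) ((d - (s + ((k:Nat)+1 : Nat))) :: cs)]
    rw [ramp_snoc s (k+1)]
    simp only [List.map_append, List.append_assoc, List.map_cons, List.map_nil]
    push_cast
    ring_nf
    simp

theorem ramp_eq_range' (lo k : Nat) : ramp ((lo : Nat) : Int) k = (List.range' lo k).map (fun r : Nat => (r : Int)) := by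
  induction k generalizing lo with
  | zero => simp [ramp]
  | succ k ih =>
    rw [List.range'_succ, List.map_cons, ramp]
    have h1 : ((lo : Int) + 1) = ((lo + 1 : Nat) : Int) := by push_cast; ring
    rw [h1, ih]

theorem A_eq_spec (view_n : Int) : get_freq_position view_n = specList view_n.toNat := by
  by_cases h : view_n ≤ 0
  · simp only [get_freq_position, specList]
    rw [PySem.List.pyRange_one_eq_nil (by omega), PySem.List.pyRange_one_eq_nil (by omega)]
    have : view_n.toNat = 0 := by omega
    simp [this]
  · push_cast at h
    obtain ⟨m, rfl⟩ : ∃ m : Nat, view_n = (m : Int) := ⟨view_n.toNat, by omega⟩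
    have hm : 1 ≤ m := by omega
    simp only [get_freq_position, specList]
    rw [PySem.List.foldl_append_singleton_eq_map, PySem.List.foldl_append_singleton_eq_map]
    rw [PySem.List.pyRange_zero_natCast, PySem.List.pyRange_one]
    simp only [List.nil_append, List.map_append, List.map_map, Int.toNat_natCast]
    have hsplit : 2 * m - 1 = m + (m - 1) := by omega
    rw [hsplit, List.range_add, List.map_append, List.map_map]
    congr 1
    · apply List.map_congr_left
      intro i hi
      rw [List.mem_range] at hi
      simp only [Function.comp_apply]
      have e1 : ([((i:Nat):Int)], [(0:Int)]) =
          ((((0:Int) + ((i:Nat):Int)) :: []), ((((i:Nat):Int) - ((0:Int) + ((i:Nat):Int))) :: [])) := by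
        simp
      rw [e1, extend_spec (m:Int) ((i:Nat):Int) 0 i (le_refl 0) (by omega) (by omega)]
      simp only [specDiag, specRows]
      have hlo : (i + 1 - m) = 0 := by omega
      have hlen : min (i+1) m - 0 = i + 1 := by omega
      rw [hlo, hlen]
      norm_num
    · have hc0 : ((m:Int) - 1).toNat = m - 1 := by omega
      rw [hc0]
      apply List.map_congr_left
      intro j hj
      rw [List.mem_range] at hj
      simp only [Function.comp_apply]
      have e1 : ([(m:Int) - 1], [(1:Int) + ((j:Nat):Int)]) =
          (((((j:Int)+1) + ((m - 2 - j : Nat) : Int)) :: []),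
           ((((m + j : Nat) : Int) - (((j:Int)+1) + ((m - 2 - j : Nat) : Int))) :: [])) := by
        refine Prod.ext ?_ ?_ <;> · simp only [List.cons.injEq, and_true]; push_cast; omega
      rw [e1, extend_spec (m:Int) ((m+j:Nat):Int) ((j:Int)+1) (m-2-j) (by omega) (by push_cast; omega) (by push_cast; omega)]
      simp only [specDiag, specRows]
      have hlo : (m + j + 1 - m) = j + 1 := by omega
      have hlen : min (m+j+1) m - (j+1) = (m-2-j) + 1 := by omega
      rw [hlo, hlen]
      have hc : ((j:Int)+1) = ((j+1 : Nat):Int) := by push_cast; ring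
      rw [hc]
      simp

theorem modify_getD (t : List (List Int)) (i d : Nat) (f : List Int → List Int) :
    (t.modify i f).getD d [] = if i = d ∧ d < t.length then f (t.getD d []) else t.getD d [] := by
  rw [List.getD_eq_getElem?_getD, List.getElem?_modify, List.getD_eq_getElem?_getD]
  by_cases hd : d < t.length
  · rw [List.getElem?_eq_getElem hd]
    by_cases hid : i = d <;> simp [hid, hd]
  · rw [List.getElem?_eq_none (by omega)]
    simp [hd]

theorem fold_len (g : Nat → List Int → List Int) (idx : Nat → Nat) (cs : List Nat) (t : List (List Int)) :
    (cs.foldl (fun t c => t.modify (idx c) (g c)) t).length = t.length := by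
  induction cs generalizing t with
  | nil => rfl
  | cons c cs ih => simp [List.foldl_cons, ih, List.length_modify]

theorem inner_getD (rN : Nat) (v : Nat → Int) (m : Nat) (t : List (List Int)) (d : Nat) :
    ((List.range m).foldl (fun t c => t.modify (rN + c) (· ++ [v c])) t).getD d [] =
      if rN ≤ d ∧ d < rN + m ∧ d < t.length then t.getD d [] ++ [v (d - rN)] else t.getD d [] := by
  induction m with
  | zero => simp; omega
  | succ m ih =>
    rw [List.range_succ, List.foldl_append, List.foldl_cons, List.foldl_nil]
    rw [modify_getD]
    rw [fold_len (fun c l => l ++ [v c]) (fun c => rN + c)]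
    rw [ih]
    by_cases h1 : rN + m = d
    · have h2 : ¬ (rN ≤ d ∧ d < rN + m ∧ d < t.length) := by omega
      rw [if_neg h2]
      by_cases h3 : d < t.length
      · rw [if_pos ⟨h1, h3⟩, if_pos (by omega)]
        have : d - rN = m := by omega
        rw [this]
      · rw [if_neg (by omega), if_neg (by omega)]
    · by_cases h4 : rN ≤ d ∧ d < rN + m ∧ d < t.length
      · rw [if_pos h4, if_neg (by omega), if_pos (by omega)]
      · rw [if_neg h4, if_neg (by omega), if_neg (by omega)]

def table0 (m : Nat) : List (List Int) := (List.range (2 * m - 1)).map (fun _ => [])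

theorem outer_len (m : Nat) (v : Nat → Nat → Int) (rs : List Nat) (t : List (List Int)) :
    (rs.foldl (fun t rN => (List.range m).foldl (fun t c => t.modify (rN + c) (· ++ [v rN c])) t) t).length = t.length := by
  induction rs generalizing t with
  | nil => rfl
  | cons r rs ih =>
    rw [List.foldl_cons, ih, fold_len (fun c l => l ++ [v r c]) (fun c => r + c)]

theorem outer_getD (m : Nat) (hm : 1 ≤ m) (v : Nat → Nat → Int) (R : Nat) (hR : R ≤ m)
    (d : Nat) (hd : d < 2 * m - 1) :
    ((List.range R).foldl (fun t rN => (List.range m).foldl (fun t c => t.modify (rN + c) (· ++ [v rN c])) t) (table0 m)).getD d []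
      = (List.range' (d + 1 - m) (min R (min (d + 1) m) - (d + 1 - m))).map (fun rN => v rN (d - rN)) := by
  induction R with
  | zero =>
    have hlen : min 0 (min (d + 1) m) - (d + 1 - m) = 0 := by omega
    rw [hlen]
    simp [table0, List.getD_eq_getElem?_getD]
  | succ R ih =>
    have hR' : R ≤ m := by omega
    rw [List.range_succ, List.foldl_append, List.foldl_cons, List.foldl_nil]
    rw [inner_getD]
    rw [outer_len, ih hR']
    have hlen2 : (table0 m).length = 2 * m - 1 := by simp [table0]
    rw [hlen2]
    by_cases hc : R ≤ d ∧ d < R + m ∧ d < 2 * m - 1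
    · rw [if_pos hc]
      have h5 : min (R + 1) (min (d + 1) m) - (d + 1 - m) = (min R (min (d + 1) m) - (d + 1 - m)) + 1 := by omega
      rw [h5, List.range'_1_concat, List.map_append]
      have h6 : d + 1 - m + (min R (min (d + 1) m) - (d + 1 - m)) = R := by omega
      rw [h6]
      simp
    · rw [if_neg hc]
      have h7 : min (R + 1) (min (d + 1) m) - (d + 1 - m) = min R (min (d + 1) m) - (d + 1 - m) := by omega
      rw [h7]

theorem foldl_nested_prod_mk {β γ σ₁ σ₂ : Type} (F : σ₁ → β → γ → σ₁) (G : σ₂ → β → γ → σ₂)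
    (outer : List β) (inner : β → List γ) (a : σ₁) (b : σ₂) :
    outer.foldl (fun s r => (inner r).foldl (fun s c => (F s.1 r c, G s.2 r c)) s) (a, b)
      = (outer.foldl (fun a r => (inner r).foldl (fun a c => F a r c) a) a,
         outer.foldl (fun b r => (inner r).foldl (fun b c => G b r c) b) b) := by
  induction outer generalizing a b with
  | nil => rfl
  | cons r rs ih =>
    simp only [List.foldl_cons]
    rw [PySem.List.foldl_prod_mk (fun a c => F a r c) (fun b c => G b r c) (inner r) a b, ih]

theorem B_eq_spec (view_n : Int) : get_freq_position_alt view_n = specList view_n.toNat := by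
  by_cases h : view_n ≤ 0
  · simp only [get_freq_position_alt, specList]
    rw [PySem.List.pyRange_one_eq_nil (a := 0) (b := 2 * view_n - 1) (by omega)]
    have : view_n.toNat = 0 := by omega
    simp [this]
  · obtain ⟨m, rfl⟩ : ∃ m : Nat, view_n = (m : Int) := ⟨view_n.toNat, by omega⟩
    have hm : 1 ≤ m := by omega
    simp only [get_freq_position_alt, specList]
    have hnd : 2 * (m : Int) - 1 = ((2 * m - 1 : Nat) : Int) := by omega
    rw [hnd, PySem.List.pyRange_zero_natCast, PySem.List.pyRange_zero_natCast]
    rw [List.foldl_map]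
    simp only [List.foldl_map]
    have hcast : ∀ (r c : Nat), (((r : Int)) + ((c : Int))).toNat = r + c := by
      intro r c; omega
    simp only [hcast]
    rw [foldl_nested_prod_mk (fun (t : List (List Int)) (r c : Nat) => t.modify (r + c) (· ++ [(r : Int)]))
          (fun (t : List (List Int)) (r c : Nat) => t.modify (r + c) (· ++ [(c : Int)])) (List.range m) (fun _ => List.range m)]
    simp only [List.map_map, Int.toNat_natCast]
    apply List.map_congr_left
    intro d hd
    rw [List.mem_range] at hd
    have hmap0 : (List.range (2 * m - 1)).map ((fun _ : Int => ([] : List Int)) ∘ (fun k : Nat => (k : Int))) = table0 m := rfl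
    rw [hmap0]
    simp only [Function.comp_apply, Int.toNat_natCast]
    rw [outer_getD m hm (fun rN _ => (rN : Int)) m (le_refl m) d hd,
        outer_getD m hm (fun _ cN => (cN : Int)) m (le_refl m) d hd]
    simp only [specDiag, specRows]
    have hmin : min m (min (d + 1) m) = min (d + 1) m := by omega
    rw [hmin]
    have hramp := ramp_eq_range' (d + 1 - m) (min (d + 1) m - (d + 1 - m))
    rw [hramp, List.map_map]
    refine Prod.ext ?_ ?_
    · rfl
    · apply List.map_congr_left
      intro rN hrN
      rw [List.mem_range'_1] at hrN
      simp only [Function.comp_apply]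
      omega

-- ===== VERDICT (by name: the statement is the Claim_ definition above) =====
theorem get_freq_position_spec : Claim_equal_get_freq_position := by
  intro view_n _
  unfold Spec_get_freq_position
  rw [A_eq_spec, B_eq_spec]
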